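-- pv_equiv track=rewrite | github.com/caseythecoder90/discrete_mathematics | chapters/chapter-01-logic-proofs/programming-applications/boolean-logic.py | prove_algorithm_correctness_invariant
-- ===== SOURCE A (Python) =====
-- from typing import Dict, List, Tuple, Any, Callable
--
-- def prove_algorithm_correctness_invariant(arr: List[int]) -> Tuple[List[int], str]:
--     """
--     Demonstrates loop invariant proof technique.
--     Proves that insertion sort maintains sorted subarray.
--     """
--     proof_steps = []
--     result = arr.copy()
--
--     proof_steps.append("Loop Invariant: Elements 0 to i-1 are sorted")
--     proof_steps.append("Base case: i=1, subarray [0] is trivially sorted")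
--
--     for i in range(1, len(result)):
--         key = result[i]
--         j = i - 1
--
--         # Maintain invariant: keep elements 0 to i sorted
--         while j >= 0 and result[j] > key:
--             result[j + 1] = result[j]
--             j -= 1
--         result[j + 1] = key
--
--         proof_steps.append(f"Step {i}: Inserted {key}, elements 0 to {i} now sorted: {result[:i+1]}")
--
--     proof_steps.append("Termination: When i = n, entire array is sorted")
--
--     return result, "\n".join(proof_steps)
-- ===== SOURCE B (Python) =====
-- from typing import List, Tuple
--
--
-- def _bisect_right(xs: List[int], x: int) -> int:
--     """Rightmost insertion point for x in sorted xs (binary search)."""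
--     lo, hi = 0, len(xs)
--     while lo < hi:
--         mid = (lo + hi) // 2
--         if x < xs[mid]:
--             hi = mid
--         else:
--             lo = mid + 1
--     return lo
--
--
-- def prove_algorithm_correctness_invariant(arr: List[int]) -> Tuple[List[int], str]:
--     proof_steps = [
--         "Loop Invariant: Elements 0 to i-1 are sorted",
--         "Base case: i=1, subarray [0] is trivially sorted",
--     ]
--     sorted_list = arr[:1]
--     for x in arr[1:]:
--         i = len(sorted_list)
--         k = _bisect_right(sorted_list, x)
--         sorted_list = sorted_list[:k] + [x] + sorted_list[k:]
--         proof_steps.append(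
--             f"Step {i}: Inserted {x}, elements 0 to {i} now sorted: {sorted_list}"
--         )
--     proof_steps.append("Termination: When i = n, entire array is sorted")
--     return sorted_list, "\n".join(proof_steps)
-- ===== Notes on version B (the rewrite author's own statement) =====
-- stated objective: alternative
-- what changed: Instead of shifting elements in place with an index-based inner while loop, B grows a separate sorted list: a hand-written bisect_right binary search finds the insertion point and the list is rebuilt by slicing, producing the identical per-step proof strings.
import Mathlib
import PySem

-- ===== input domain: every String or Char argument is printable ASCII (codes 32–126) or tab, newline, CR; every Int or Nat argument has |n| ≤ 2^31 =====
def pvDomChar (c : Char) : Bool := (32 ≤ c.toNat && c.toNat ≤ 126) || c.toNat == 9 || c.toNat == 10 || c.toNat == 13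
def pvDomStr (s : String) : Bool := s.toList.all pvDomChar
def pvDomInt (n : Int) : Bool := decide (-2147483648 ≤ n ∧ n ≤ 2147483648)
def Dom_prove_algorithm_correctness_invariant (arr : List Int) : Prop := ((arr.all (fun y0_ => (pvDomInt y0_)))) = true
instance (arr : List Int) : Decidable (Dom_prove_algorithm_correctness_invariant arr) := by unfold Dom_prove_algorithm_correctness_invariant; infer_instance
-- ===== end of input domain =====

-- B replaces A's in-place right-to-left shifting with a separate growing sorted list:
-- a hand-written bisect_right binary search finds the insertion point and the list is
-- rebuilt by slicing; same return value (neither version mutates the caller's list).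

-- ===== PORT A =====
-- Python's repr of a list of ints, as produced inside the f-string (shared formatting helper)
def pvListRepr (xs : List Int) : String :=
  "[" ++ PySem.Str.join ", " (xs.map PySem.Int.toStr) ++ "]"

-- the f-string "Step {i}: Inserted {key}, elements 0 to {i} now sorted: {…}" (shared helper)
def pvStepStr (i key : Int) (pre : List Int) : String :=
  "Step " ++ PySem.Int.toStr i ++ ": Inserted " ++ PySem.Int.toStr key ++
  ", elements 0 to " ++ PySem.Int.toStr i ++ " now sorted: " ++ pvListRepr pre

-- A's inner while loop: 'while j >= 0 and result[j] > key: result[j+1] = result[j]; j -= 1'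
-- (pyGetD/pySetD with a default: the indices are always in range when the loop body runs)
def pvShift (result : List Int) (key : Int) (j : Int) : List Int × Int :=
  if h : 0 ≤ j ∧ PySem.List.pyGetD result j 0 > key then
    pvShift (PySem.List.pySetD result (j + 1) (PySem.List.pyGetD result j 0)) key (j - 1)
  else (result, j)
termination_by (j + 1).toNat
decreasing_by omega

-- one iteration of A's for-loop body
def pvAStep (acc : List Int × List String) (i : Int) : List Int × List String :=
  let result := acc.1
  let key := PySem.List.pyGetD result i 0
  let s := pvShift result key (i - 1)
  let r2 := PySem.List.pySetD s.1 (s.2 + 1) key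
  (r2, acc.2 ++ [pvStepStr i key (PySem.List.slice r2 none (some (i + 1)))])

def prove_algorithm_correctness_invariant (arr : List Int) : List Int × String :=
  let steps0 : List String :=
    ["Loop Invariant: Elements 0 to i-1 are sorted",
     "Base case: i=1, subarray [0] is trivially sorted"]
  let res := (PySem.List.pyRange 1 (arr.length : Int) 1).foldl pvAStep (arr, steps0)
  (res.1, PySem.Str.join "\n" (res.2 ++ ["Termination: When i = n, entire array is sorted"]))

-- ===== PORT B =====
-- hand-written bisect_right of Source B: 'while lo < hi: mid = (lo+hi)//2; …'
def pvBisectRight (xs : List Int) (x : Int) (lo hi : Int) : Int :=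
  if h : lo < hi then
    let mid := PySem.Int.floordiv (lo + hi) 2
    if x < PySem.List.pyGetD xs mid 0 then pvBisectRight xs x lo mid
    else pvBisectRight xs x (mid + 1) hi
  else lo
termination_by (hi - lo).toNat
decreasing_by
  · have hb := PySem.Int.floordiv_lt_iff_lt_mul (a := lo + hi) (b := 2) (q := hi) (by omega)
    have hlo := PySem.Int.floordiv_two_mid_bounds (lo := lo) (hi := hi) (by omega)
    omega
  · have hlo := PySem.Int.floordiv_two_mid_bounds (lo := lo) (hi := hi) (by omega)
    omega

-- one iteration of B's for-loop body: 'sorted_list = sorted_list[:k] + [x] + sorted_list[k:]'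
def pvBStep (acc : List Int × List String) (x : Int) : List Int × List String :=
  let i : Int := (acc.1.length : Int)
  let k := pvBisectRight acc.1 x 0 (acc.1.length : Int)
  let s' := PySem.List.slice acc.1 none (some k) ++ [x] ++ PySem.List.slice acc.1 (some k) none
  (s', acc.2 ++ [pvStepStr i x s'])

def prove_algorithm_correctness_invariant_alt (arr : List Int) : List Int × String :=
  let steps0 : List String :=
    ["Loop Invariant: Elements 0 to i-1 are sorted",
     "Base case: i=1, subarray [0] is trivially sorted"]
  let res := (PySem.List.slice arr (some 1) none).foldl pvBStep
      (PySem.List.slice arr none (some 1), steps0)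
  (res.1, PySem.Str.join "\n" (res.2 ++ ["Termination: When i = n, entire array is sorted"]))

-- ===== PRECONDITION & SPEC =====
def Spec_prove_algorithm_correctness_invariant (arr : List Int) (out : List Int × String) : Prop := out = prove_algorithm_correctness_invariant_alt arr
instance (arr : List Int) (out : List Int × String) : Decidable (Spec_prove_algorithm_correctness_invariant arr out) := by unfold Spec_prove_algorithm_correctness_invariant; infer_instance

-- ===== CLAIM (what is proved, stated in full; the proofs are below) =====
def Claim_equal_prove_algorithm_correctness_invariant : Prop := ∀ (arr : List Int), Dom_prove_algorithm_correctness_invariant arr → Spec_prove_algorithm_correctness_invariant arr (prove_algorithm_correctness_invariant arr)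

-- ===== LEMMAS AND PROOFS =====
-- the canonical stable insertion both loop bodies implement
def pvIns (xs : List Int) (x : Int) : List Int :=
  xs.takeWhile (fun y => decide (y ≤ x)) ++ x :: xs.dropWhile (fun y => decide (y ≤ x))

lemma pvIns_length (xs : List Int) (x : Int) : (pvIns xs x).length = xs.length + 1 := by
  have h := congrArg List.length
    (List.takeWhile_append_dropWhile (p := fun y => decide (y ≤ x)) (l := xs))
  rw [List.length_append] at h
  simp [pvIns]
  omega

lemma pvIns_all_le (l : List Int) (key : Int) (h : ∀ a ∈ l, a ≤ key) :
    pvIns l key = l ++ [key] := by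
  unfold pvIns
  rw [List.takeWhile_eq_self_iff.mpr (by simpa using h),
      List.dropWhile_eq_nil_iff.mpr (by simpa using h)]

lemma pvIns_append_gt (q : List Int) (key x : Int) (h : key < x) :
    pvIns (q ++ [x]) key = pvIns q key ++ [x] := by
  induction q with
  | nil => simp [pvIns, List.takeWhile, List.dropWhile, show ¬ (x ≤ key) by omega]
  | cons a q ih =>
    by_cases ha : a ≤ key
    · simp only [pvIns, List.cons_append, List.takeWhile_cons, List.dropWhile_cons,
        decide_eq_true ha] at ih ⊢
      simpa using congrArg (List.cons a) ih
    · simp [pvIns, List.takeWhile_cons, List.dropWhile_cons, ha]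

lemma pvIns_mem {l : List Int} {x a : Int} (h : a ∈ pvIns l x) : a = x ∨ a ∈ l := by
  unfold pvIns at h
  simp at h
  rcases h with h | h | h
  · right; exact (List.takeWhile_sublist _).mem h
  · left; exact h
  · right; exact (List.dropWhile_sublist _).mem h

lemma pvIns_pairwise {l : List Int} (x : Int) (h : l.Pairwise (· ≤ ·)) :
    (pvIns l x).Pairwise (· ≤ ·) := by
  induction l with
  | nil => simp [pvIns]
  | cons a l ih =>
    rcases List.pairwise_cons.mp h with ⟨ha, hl⟩
    by_cases hax : a ≤ x
    · have : pvIns (a :: l) x = a :: pvIns l x := by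
        simp [pvIns, List.takeWhile_cons, List.dropWhile_cons, hax]
      rw [this]
      refine List.pairwise_cons.mpr ⟨?_, ih hl⟩
      intro b hb
      rcases pvIns_mem hb with rfl | hb
      · exact hax
      · exact ha b hb
    · have : pvIns (a :: l) x = x :: a :: l := by
        simp [pvIns, List.takeWhile_cons, List.dropWhile_cons, hax]
      rw [this]
      refine List.pairwise_cons.mpr ⟨?_, h⟩
      intro b hb
      rcases List.mem_cons.mp hb with rfl | hb
      · omega
      · have := ha b hb; omega

lemma pvGetD_append_len (q t : List Int) (x : Int) :
    PySem.List.pyGetD (q ++ x :: t) (q.length : Int) 0 = x := by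
  rw [PySem.List.pyGetD_natCast]
  simp [List.getD, List.getElem?_append_right]

lemma pvSetD_append_len (q t : List Int) (x v : Int) :
    PySem.List.pySetD (q ++ x :: t) ((q.length : Int) + 1) v = q ++ x :: (t.set 0 v) := by
  have : ((q.length : Int) + 1) = ((q.length + 1 : Nat) : Int) := by push_cast; ring
  rw [this, PySem.List.pySetD_natCast]
  rw [show q ++ x :: t = (q ++ [x]) ++ t by simp]
  rw [show q.length + 1 = (q ++ [x]).length + 0 by simp]
  rw [List.set_append_right _ _ (by simp)]
  simp

-- A's inner loop followed by 'result[j+1] = key' performs the canonical insertion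
lemma pvAInsert_eq (p : List Int) : ∀ (z key : Int) (t : List Int), p.Pairwise (· ≤ ·) →
    (let s := pvShift (p ++ z :: t) key ((p.length : Int) - 1);
     PySem.List.pySetD s.1 (s.2 + 1) key) = pvIns p key ++ t := by
  induction p using List.reverseRecOn with
  | nil =>
    intro z key t _
    simp only [List.nil_append, List.length_nil]
    rw [pvShift]
    simp [PySem.List.pySetD_of_nonneg, pvIns]
  | append_singleton q x ih =>
    intro z key t hp
    have hq : q.Pairwise (· ≤ ·) := hp.sublist (by simp)
    have hr : (q ++ [x]) ++ z :: t = q ++ x :: z :: t := by simp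
    have hlen : ((q ++ [x]).length : Int) - 1 = (q.length : Int) := by simp
    by_cases hx : x > key
    · -- one shift step, then the induction hypothesis with z := x, t := x :: t
      rw [pvShift]
      rw [dif_pos (by
        refine ⟨by rw [hlen]; positivity, ?_⟩
        rw [hlen, hr, pvGetD_append_len]
        exact hx)]
      simp only []
      rw [hlen, hr, pvGetD_append_len, pvSetD_append_len q (z :: t) x x,
        List.set_cons_zero]
      have hih := ih x key (x :: t) hq
      simp only [] at hih
      rw [hih, pvIns_append_gt q key x (by omega)]
      simp
    · -- loop exits immediately; by sortedness all of q ++ [x] is ≤ key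
      rw [pvShift]
      rw [dif_neg (by
        rw [hlen, hr, pvGetD_append_len]
        omega)]
      simp only []
      rw [hlen, hr, pvSetD_append_len]
      have hall : ∀ a ∈ q ++ [x], a ≤ key := by
        intro a ha
        rcases List.mem_append.mp ha with ha | ha
        · have := (List.pairwise_append.mp hp).2.2 a ha x (by simp)
          omega
        · simp at ha; omega
      rw [pvIns_all_le _ _ hall]
      simp

lemma pvTakeWhile_length_eq (xs : List Int) (x : Int) : ∀ (k : Nat), k ≤ xs.length →
    (∀ (n : Nat) (hn : n < xs.length), n < k → xs[n] ≤ x) →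
    (∀ (n : Nat) (hn : n < xs.length), k ≤ n → x < xs[n]) →
    (xs.takeWhile (fun y => decide (y ≤ x))).length = k := by
  induction xs with
  | nil => intro k hk _ _; simp at hk ⊢; omega
  | cons y t ih =>
    intro k hk h1 h2
    cases k with
    | zero =>
      have := h2 0 (by simp) (by omega)
      simp at this
      simp [List.takeWhile_cons, show ¬ (y ≤ x) by omega]
    | succ k' =>
      have hy := h1 0 (by simp) (by omega)
      simp at hy
      simp only [List.takeWhile_cons, decide_eq_true hy, if_true, List.length_cons]
      rw [ih k' (by simpa using hk)
        (fun n hn hnk => by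
          have := h1 (n + 1) (by simpa using hn) (by omega)
          simpa using this)
        (fun n hn hnk => by
          have := h2 (n + 1) (by simpa using hn) (by omega)
          simpa using this)]

lemma pvPairwise_getElem_le {xs : List Int} (hs : xs.Pairwise (· ≤ ·))
    {i j : Nat} (hi : i < xs.length) (hj : j < xs.length) (hij : i ≤ j) :
    xs[i] ≤ xs[j] := by
  rcases Nat.lt_or_ge i j with h | h
  · exact List.pairwise_iff_getElem.mp hs i j hi hj h
  · have : i = j := by omega
    subst this; rfl

-- B's binary search computes the bisect_right point of a sorted list
lemma pvBisectRight_spec (xs : List Int) (x : Int) (hs : xs.Pairwise (· ≤ ·)) :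
    ∀ (fuel : Nat) (lo hi : Int), (hi - lo).toNat ≤ fuel → 0 ≤ lo → lo ≤ hi → hi ≤ (xs.length : Int) →
    (∀ (n : Nat) (hn : n < xs.length), (n : Int) < lo → xs[n] ≤ x) →
    (∀ (n : Nat) (hn : n < xs.length), hi ≤ (n : Int) → x < xs[n]) →
    pvBisectRight xs x lo hi = ((xs.takeWhile (fun y => decide (y ≤ x))).length : Int) := by
  intro fuel
  induction fuel with
  | zero =>
    intro lo hi hf h0 hlh hhl h1 h2
    have : lo = hi := by omega
    subst this
    rw [pvBisectRight, dif_neg (by omega)]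
    rw [pvTakeWhile_length_eq xs x lo.toNat (by omega)
      (fun n hn hnk => h1 n hn (by omega))
      (fun n hn hnk => h2 n hn (by omega))]
    omega
  | succ f ihf =>
    intro lo hi hf h0 hlh hhl h1 h2
    by_cases hlt : lo < hi
    · rw [pvBisectRight, dif_pos hlt]
      have hmid := PySem.Int.floordiv_two_mid_bounds (lo := lo) (hi := hi) (by omega)
      have hmidlt : PySem.Int.floordiv (lo + hi) 2 < hi :=
        (PySem.Int.floordiv_lt_iff_lt_mul (by omega)).mpr (by omega)
      set mid := PySem.Int.floordiv (lo + hi) 2 with hmiddef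
      have hmrange : 0 ≤ mid ∧ mid < (xs.length : Int) := ⟨by omega, by omega⟩
      have hget := PySem.List.pyGetD_eq_getElem (xs := xs) (i := mid) (d := 0)
        hmrange.1 (by exact_mod_cast hmrange.2)
      by_cases hc : x < PySem.List.pyGetD xs mid 0
      · rw [if_pos hc]
        refine ihf lo mid (by omega) h0 (by omega) (by omega) h1 ?_
        intro n hn hmn
        have := pvPairwise_getElem_le hs (i := mid.toNat) (j := n) (by omega) hn (by omega)
        rw [hget] at hc
        omega
      · rw [if_neg hc]
        refine ihf (mid + 1) hi (by omega) (by omega) (by omega) hhl ?_ h2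
        intro n hn hnm
        have := pvPairwise_getElem_le hs (i := n) (j := mid.toNat) hn (by omega) (by omega)
        rw [hget] at hc
        omega
    · have : lo = hi := by omega
      subst this
      rw [pvBisectRight, dif_neg (by omega)]
      rw [pvTakeWhile_length_eq xs x lo.toNat (by omega)
        (fun n hn hnk => h1 n hn (by omega))
        (fun n hn hnk => h2 n hn (by omega))]
      omega

lemma pvTake_takeWhile (l : List Int) (p : Int → Bool) :
    l.take (l.takeWhile p).length = l.takeWhile p := by
  induction l with
  | nil => simp
  | cons a l ih =>
    by_cases hpa : p a
    · simp [List.takeWhile_cons, hpa, ih]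
    · simp [List.takeWhile_cons, hpa]

lemma pvDrop_takeWhile (l : List Int) (p : Int → Bool) :
    l.drop (l.takeWhile p).length = l.dropWhile p := by
  induction l with
  | nil => simp
  | cons a l ih =>
    by_cases hpa : p a
    · simp [List.takeWhile_cons, List.dropWhile_cons, hpa, ih]
    · simp [List.takeWhile_cons, List.dropWhile_cons, hpa]

-- B's loop body performs the same canonical insertion and appends the same step string
lemma pvBStep_eq (done : List Int) (steps : List String) (x : Int)
    (hs : done.Pairwise (· ≤ ·)) :
    pvBStep (done, steps) x
      = (pvIns done x, steps ++ [pvStepStr (done.length : Int) x (pvIns done x)]) := by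
  have hk : pvBisectRight done x 0 (done.length : Int)
      = ((done.takeWhile (fun y => decide (y ≤ x))).length : Int) :=
    pvBisectRight_spec done x hs ((done.length : Int) - 0).toNat 0 (done.length : Int)
      (le_refl _) (le_refl _) (by positivity) (le_refl _)
      (fun n hn h => by omega) (fun n hn h => by omega)
  unfold pvBStep
  simp only [hk]
  rw [PySem.List.slice_to_natCast, PySem.List.slice_from_natCast,
    pvTake_takeWhile, pvDrop_takeWhile]
  simp [pvIns]

-- A's loop body performs the canonical insertion and appends the same step string
lemma pvAStep_eq (done rest : List Int) (steps : List String) (x : Int)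
    (hs : done.Pairwise (· ≤ ·)) :
    pvAStep (done ++ x :: rest, steps) (done.length : Int)
      = (pvIns done x ++ rest,
         steps ++ [pvStepStr (done.length : Int) x (pvIns done x)]) := by
  unfold pvAStep
  simp only [pvGetD_append_len]
  have hins := pvAInsert_eq done x x rest hs
  simp only [] at hins
  rw [hins]
  have hlen : (done.length : Int) + 1 = ((pvIns done x).length : Nat) := by
    rw [pvIns_length]; push_cast; ring
  rw [hlen, PySem.List.slice_to_natCast, List.take_left]

-- the two loops stay in lockstep: sorted prefix 'done' placed, 'rest' still to insert
lemma pvMain (rest : List Int) : ∀ (done : List Int) (steps : List String),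
    done.Pairwise (· ≤ ·) →
    (PySem.List.pyRange (done.length : Int) ((done.length : Int) + (rest.length : Int)) 1).foldl
      pvAStep (done ++ rest, steps)
    = rest.foldl pvBStep (done, steps) := by
  induction rest with
  | nil =>
    intro done steps _
    rw [PySem.List.pyRange_one_eq_nil (by simp)]
    simp
  | cons x rest ih =>
    intro done steps hs
    rw [PySem.List.pyRange_one_cons (by simp)]
    simp only [List.foldl_cons]
    rw [pvAStep_eq done rest steps x hs, pvBStep_eq done steps x hs]
    have h1 : ((done.length : Int) + 1) = ((pvIns done x).length : Int) := by
      rw [pvIns_length]; push_cast; ring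
    have h2 : (done.length : Int) + ((x :: rest).length : Int)
        = ((pvIns done x).length : Int) + (rest.length : Int) := by
      rw [pvIns_length]; simp; ring
    rw [h1, h2]
    exact ih (pvIns done x) _ (pvIns_pairwise x hs)

-- ===== VERDICT (by name: the statement is the Claim_ definition above) =====
theorem prove_algorithm_correctness_invariant_spec : Claim_equal_prove_algorithm_correctness_invariant := by
  intro arr _
  unfold Spec_prove_algorithm_correctness_invariant
  cases arr with
  | nil => rfl
  | cons a l =>
    unfold prove_algorithm_correctness_invariant prove_algorithm_correctness_invariant_alt
    simp only []
    have hto : PySem.List.slice (a :: l) none (some 1) = [a] := by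
      simp [pysem]
    have hfrom : PySem.List.slice (a :: l) (some 1) none = l := by
      simp [pysem]
    rw [hto, hfrom]
    have hm := pvMain l [a]
      ["Loop Invariant: Elements 0 to i-1 are sorted",
       "Base case: i=1, subarray [0] is trivially sorted"] (by simp)
    simp only [List.length_singleton, Nat.cast_one, List.singleton_append] at hm
    have hlen : ((a :: l).length : Int) = 1 + (l.length : Int) := by simp; omega
    rw [hlen, hm]
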